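-- pv_equiv track=rewrite | github.com/imteekay/algorithms | interview_training/leetcode/easy/delete_columns_to_make_sorted/delete_columns_to_make_sorted.py | min_deletion_size
-- ===== SOURCE A (Python) =====
-- def min_deletion_size(strs):
--     counter = 0
--
--     for col in range(len(strs[0])):
--         column = []
--
--         for row in range(len(strs)):
--             column.append(strs[row][col])
--
--         if column != sorted(column): counter += 1
--
--     return counter
-- ===== SOURCE B (Python) =====
-- def min_deletion_size(strs):
--     counter = 0
--     for col in range(len(strs[0])):
--         if any(prev[col] > cur[col] for prev, cur in zip(strs, strs[1:])):
--             counter += 1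
--     return counter
-- ===== Notes on version B (the rewrite author's own statement) =====
-- stated objective: alternative
-- what changed: Instead of materialising each column as a list and comparing it with its sorted copy, B checks each column's adjacent row pairs directly with an early-exiting any(), so no column list is built and no sort is performed.
import Mathlib
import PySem

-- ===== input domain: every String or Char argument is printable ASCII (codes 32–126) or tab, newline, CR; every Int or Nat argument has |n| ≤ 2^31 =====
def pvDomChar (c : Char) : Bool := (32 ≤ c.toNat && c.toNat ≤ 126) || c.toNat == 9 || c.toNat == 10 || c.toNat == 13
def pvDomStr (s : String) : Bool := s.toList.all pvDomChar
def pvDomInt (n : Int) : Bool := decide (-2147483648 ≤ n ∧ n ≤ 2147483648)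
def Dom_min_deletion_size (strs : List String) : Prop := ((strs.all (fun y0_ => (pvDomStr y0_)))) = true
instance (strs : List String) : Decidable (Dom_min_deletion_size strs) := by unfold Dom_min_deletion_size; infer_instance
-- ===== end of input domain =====

-- B replaces A's per-column build-list-and-compare-with-sorted by a direct adjacent-pair
-- scan with early exit (any): no column list is built and no sort is performed.

-- ===== PORT A =====
def min_deletion_size (strs : List String) : Int :=
  (PySem.List.pyRange 0 (((PySem.List.pyGetD strs 0 "").length : Int)) 1).foldl
    (fun counter col =>
      let column : List Char :=
        (PySem.List.pyRange 0 ((strs.length : Int)) 1).foldl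
          (fun acc row =>
            acc ++ [(PySem.Str.pyGet? (PySem.List.pyGetD strs row "") col).getD ' ']) []
      if column ≠ PySem.List.sorted column (fun x => x) false then counter + 1 else counter)
    0

-- ===== PORT B =====
def min_deletion_size_alt (strs : List String) : Int :=
  (PySem.List.pyRange 0 (((PySem.List.pyGetD strs 0 "").length : Int)) 1).foldl
    (fun counter col =>
      if (strs.zip (strs.drop 1)).any
          (fun p => decide ((PySem.Str.pyGet? p.2 col).getD ' ' < (PySem.Str.pyGet? p.1 col).getD ' '))
      then counter + 1 else counter)
    0

-- ===== PRECONDITION & SPEC =====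
-- Pre_ excludes exactly the inputs where Python A raises IndexError: the empty list
-- (strs[0]) and lists with a string shorter than strs[0] (strs[row][col]).
def Pre_min_deletion_size (strs : List String) : Prop :=
  strs ≠ [] ∧ ∀ s ∈ strs, (strs.headD "").length ≤ s.length
instance (strs : List String) : Decidable (Pre_min_deletion_size strs) := by
  unfold Pre_min_deletion_size; infer_instance
def pvWitness_min_deletion_size : List String := ["cba", "daf", "ghi"]

def Spec_min_deletion_size (strs : List String) (out : Int) : Prop := out = min_deletion_size_alt strs
instance (strs : List String) (out : Int) : Decidable (Spec_min_deletion_size strs out) := by unfold Spec_min_deletion_size; infer_instance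

-- ===== CLAIM (what is proved, stated in full; the proofs are below) =====
def Claim_equal_min_deletion_size : Prop := ∀ (strs : List String), Dom_min_deletion_size strs → Pre_min_deletion_size strs → Spec_min_deletion_size strs (min_deletion_size strs)

-- ===== LEMMAS AND PROOFS =====

-- A list of chars equals its Python sort iff it is adjacent-pairwise nondecreasing.
theorem sorted_eq_self_iff_isChain (c : List Char) :
    PySem.List.sorted c (fun x => x) false = c ↔ c.IsChain (· ≤ ·) := by
  rw [List.isChain_iff_pairwise]
  constructor
  · intro h
    have hp := PySem.List.sorted_pairwise c (fun x => x)
    rwa [h] at hp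
  · intro h
    exact PySem.List.sorted_eq_self_of_pairwise c (fun x => x) h

-- B's any over adjacent pairs detects exactly the failure of chainwise order of the mapped column.
theorem any_zip_iff_not_isChain (f : String → Char) (l : List String) :
    ((l.zip (l.drop 1)).any (fun p => decide (f p.2 < f p.1))) = true
      ↔ ¬ (l.map f).IsChain (· ≤ ·) := by
  induction l with
  | nil => simp
  | cons a t ih =>
    cases t with
    | nil => simp
    | cons b t' =>
      simp only [List.drop_succ_cons, List.drop_zero, List.zip_cons_cons, List.any_cons,
        List.map_cons, List.isChain_cons_cons, Bool.or_eq_true, decide_eq_true_eq] at *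
      rw [ih]
      constructor
      · rintro (h | h) ⟨h1, h2⟩
        · exact absurd h1 (not_le.mpr h)
        · exact h h2
      · intro h
        by_cases hle : f a ≤ f b
        · exact Or.inr (fun hc => h ⟨hle, hc⟩)
        · exact Or.inl (not_le.mp hle)

-- ===== VERDICT (by name: the statement is the Claim_ definition above) =====
theorem min_deletion_size_spec : Claim_equal_min_deletion_size := by
  intro strs _ _
  unfold Spec_min_deletion_size min_deletion_size min_deletion_size_alt
  apply PySem.List.foldl_congr_mem
  intro counter col _
  have hcol :
      (PySem.List.pyRange 0 ((strs.length : Int)) 1).foldl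
          (fun acc row =>
            acc ++ [(PySem.Str.pyGet? (PySem.List.pyGetD strs row "") col).getD ' ']) []
        = strs.map (fun s => (PySem.Str.pyGet? s col).getD ' ') := by
    rw [PySem.List.foldl_pyRange_zero_pyGetD' strs ""
      (fun acc s => acc ++ [(PySem.Str.pyGet? s col).getD ' ']) []]
    simp only [PySem.List.foldl_append_singleton_eq_map, List.nil_append]
  simp only [hcol]
  have key :
      ((strs.map (fun s => (PySem.Str.pyGet? s col).getD ' '))
          ≠ PySem.List.sorted (strs.map (fun s => (PySem.Str.pyGet? s col).getD ' ')) (fun x => x) false)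
        ↔ ((strs.zip (strs.drop 1)).any
            (fun p => decide ((PySem.Str.pyGet? p.2 col).getD ' ' < (PySem.Str.pyGet? p.1 col).getD ' '))) = true := by
    rw [any_zip_iff_not_isChain (fun s => (PySem.Str.pyGet? s col).getD ' ') strs,
      ← sorted_eq_self_iff_isChain, ne_comm]
  by_cases hb : ((strs.zip (strs.drop 1)).any
      (fun p => decide ((PySem.Str.pyGet? p.2 col).getD ' ' < (PySem.Str.pyGet? p.1 col).getD ' '))) = true
  · rw [if_pos (key.mpr hb), if_pos hb]
  · rw [if_neg (fun hh => hb (key.mp hh)), if_neg hb]
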